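-- pv_equiv track=rewrite | github.com/imswfu0110/win | algo.py | set_combination
-- ===== SOURCE A (Python) =====
-- def restore (num,bitmap):
--     count=0
--     for i in range(num):
--         if bitmap[i]==1:
--             count=count+1
--     for i in range(num):
--         if i<count:
--             bitmap[i]=1
--         else :
--             bitmap[i]=0
--     return bitmap
--
-- def set_bitmap (base,num):
--     bitmap=set_zero_list(base)
--     for i in range(num):
--         bitmap[i]=1
--     return bitmap
--
-- def jdgover(n,bitmap):
--     for i in range(len(bitmap)-n,len(bitmap)):
--         if bitmap[i] == 0:
--             return False
--     return True
--
-- def generate_data_bitmap(bitmap):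
--     data = set_zero_list(len(bitmap))
--     for i in range(len(bitmap)):
--         if bitmap[i] == 1:
--             data[i]=1
--     return data
--
-- def set_combination(base, up):
--     data = []
--     bitmap = set_bitmap(base, up)
--     temp = generate_data_bitmap(bitmap)
--     data.append(temp)
--     i = 0
--     while i < base - 1:
--         if bitmap[i] == 1 and bitmap[i + 1] == 0:
--             bitmap[i] = 0
--             bitmap[i + 1] = 1
--             restore(i, bitmap)
--             temp = generate_data_bitmap(bitmap)
--             data.append(temp)
--             i = -1
--         if jdgover(up, bitmap):
--             break
--         i = i + 1
--     return data
--
-- def set_zero_list(n):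
--     return [0] * n
-- ===== SOURCE B (Python) =====
-- def set_combination(base, up):
--     bitmap = [0] * base
--     for i in range(up):
--         bitmap[i] = 1
--     n = len(bitmap)
--     k = sum(bitmap)
--     def colex(n, k):
--         if k == 0:
--             return [[0] * n]
--         if n <= k:
--             return [[1] * n]
--         return [b + [0] for b in colex(n - 1, k)] + [b + [1] for b in colex(n - 1, k - 1)]
--     return colex(n, k)
-- ===== Notes on version B (the rewrite author's own statement) =====
-- stated objective: simpler
-- what changed: Replaces A's in-place successor search (scan for a '10' pattern, flip it, restore the prefix, rescan from i=-1) by a direct recursive construction: colex-ordered k-of-n bitmaps are the (k-of-(n-1)) bitmaps with 0 appended followed by the ((k-1)-of-(n-1)) bitmaps with 1 appended.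
import Mathlib
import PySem

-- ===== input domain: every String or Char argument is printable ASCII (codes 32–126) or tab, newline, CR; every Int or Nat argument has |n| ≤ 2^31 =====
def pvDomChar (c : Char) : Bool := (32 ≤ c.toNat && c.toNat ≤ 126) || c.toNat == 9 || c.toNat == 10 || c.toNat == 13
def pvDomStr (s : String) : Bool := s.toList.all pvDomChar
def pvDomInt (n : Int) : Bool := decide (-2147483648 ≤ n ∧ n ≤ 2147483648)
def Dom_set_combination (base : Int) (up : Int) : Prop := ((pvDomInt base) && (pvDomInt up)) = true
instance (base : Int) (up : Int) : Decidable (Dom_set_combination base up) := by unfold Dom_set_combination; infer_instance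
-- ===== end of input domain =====

-- B replaces A's in-place successor search (scan for a "10" pattern, flip, restore the prefix,
-- rescan) by a direct recursive construction of the colex-ordered bitmap list (objective: simpler).

-- ===== PORT A =====
def set_zero_listA (n : Int) : List Int := List.replicate n.toNat 0

def set_bitmapA (base num : Int) : List Int :=
  (PySem.List.pyRange 0 num 1).foldl (fun bm i => PySem.List.pySetD bm i 1) (set_zero_listA base)

def restoreA (num : Int) (bitmap : List Int) : List Int :=
  let count : Int :=
    (PySem.List.pyRange 0 num 1).foldl
      (fun c i => if PySem.List.pyGetD bitmap i 0 = 1 then c + 1 else c) 0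
  (PySem.List.pyRange 0 num 1).foldl
    (fun bm i => if i < count then PySem.List.pySetD bm i 1 else PySem.List.pySetD bm i 0)
    bitmap

def jdgoverA (n : Int) (bitmap : List Int) : Bool :=
  -- Python's early-return scan "if bitmap[i]==0: return False … return True" is `.all`
  (PySem.List.pyRange ((bitmap.length : Int) - n) (bitmap.length : Int) 1).all
    (fun i => !(PySem.List.pyGetD bitmap i 0 == 0))

def generate_data_bitmapA (bitmap : List Int) : List Int :=
  (PySem.List.pyRange 0 (bitmap.length : Int) 1).foldl
    (fun d i => if PySem.List.pyGetD bitmap i 0 = 1 then PySem.List.pySetD d i 1 else d)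
    (set_zero_listA (bitmap.length : Int))

-- the while-loop of set_combination; fuel only makes it total (the top-level call passes
-- provably sufficient fuel, see lemma S_le / set_combination_spec)
def loopA : Nat → Int → Int → List Int → List (List Int) → List (List Int)
  | 0, _, _, _, data => data
  | (f+1), up, i, bitmap, data =>
    if i < (bitmap.length : Int) - 1 then
      if PySem.List.pyGetD bitmap i 0 = 1 ∧ PySem.List.pyGetD bitmap (i+1) 0 = 0 then
        -- bitmap[i]=0 ; bitmap[i+1]=1 ; restore(i,bitmap) ; data.append(…) ; i=-1
        let bm := restoreA i (PySem.List.pySetD (PySem.List.pySetD bitmap i 0) (i+1) 1)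
        let data' := data ++ [generate_data_bitmapA bm]
        if jdgoverA up bm then data' else loopA f up 0 bm data'
      else
        if jdgoverA up bitmap then data else loopA f up (i+1) bitmap data
    else data

def set_combination (base : Int) (up : Int) : List (List Int) :=
  let bitmap := set_bitmapA base up
  let data := [generate_data_bitmapA bitmap]
  loopA (base.toNat * 2 ^ base.toNat + base.toNat + 2) up 0 bitmap data

-- ===== PORT B =====
-- colex n k: n = 0 covers both Python base cases ([[0]*0] = [[1]*0] = [[]]); k < 0 never
-- occurs in Source B (k is a sum of 0/1 entries)
def colexB : Nat → Int → List (List Int)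
  | 0, _ => [[]]
  | (n+1), k =>
    if k = 0 then [List.replicate (n+1) (0 : Int)]
    else if ((n : Int) + 1 ≤ k) then [List.replicate (n+1) (1 : Int)]
    else (colexB n k).map (· ++ [0]) ++ (colexB n (k-1)).map (· ++ [1])

def set_combination_alt (base : Int) (up : Int) : List (List Int) :=
  let bitmap := (PySem.List.pyRange 0 up 1).foldl
      (fun bm i => PySem.List.pySetD bm i 1) (List.replicate base.toNat (0 : Int))
  let k : Int := bitmap.foldl (· + ·) 0
  colexB bitmap.length k

-- ===== PRECONDITION & SPEC =====
-- Pre_ excludes exactly the inputs where Python A raises IndexError (writing the first `up`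
-- cells of a length-`base` list with up > max(base,0)); Source B raises there identically.
def Pre_set_combination (base : Int) (up : Int) : Prop := up ≤ base ∨ up ≤ 0
instance (base : Int) (up : Int) : Decidable (Pre_set_combination base up) := by
  unfold Pre_set_combination; infer_instance

def pvWitness_set_combination : Int × Int := (4, 2)

def Spec_set_combination (base : Int) (up : Int) (out : List (List Int)) : Prop :=
  out = set_combination_alt base up
instance (base : Int) (up : Int) (out : List (List Int)) :
    Decidable (Spec_set_combination base up out) := by
  unfold Spec_set_combination; infer_instance

-- ===== CLAIM (what is proved, stated in full; the proofs are below) =====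
def Claim_equal_set_combination : Prop := ∀ (base : Int) (up : Int),
  Dom_set_combination base up → Pre_set_combination base up →
  Spec_set_combination base up (set_combination base up)

-- ===== LEMMAS AND PROOFS =====

-- canonical bitmaps: first / last k-of-n combination in colex order
def mnL (n k : Nat) : List Int := List.replicate k 1 ++ List.replicate (n - k) 0
def mxL (n k : Nat) : List Int := List.replicate (n - k) 0 ++ List.replicate k 1
def binL (l : List Int) : Prop := ∀ x ∈ l, x = 0 ∨ x = 1

-- iteration count of A's while-loop over a k-of-n region
def SA : Nat → Nat → Nat
  | 0, _ => 0
  | (n+1), k => if 0 < k ∧ k < n+1 then SA n k + n + SA n (k-1) else 0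

theorem SA_le (n k : Nat) : SA n k ≤ n * 2 ^ n := by
  induction n generalizing k with
  | zero => simp [SA]
  | succ n ih =>
    unfold SA
    split
    · have h1 := ih k
      have h2 := ih (k-1)
      have : n ≤ 2 ^ n := Nat.le_of_lt (Nat.lt_two_pow_self)
      have : 2 ^ (n+1) = 2 * 2 ^ n := by ring
      nlinarith
    · positivity

theorem mnL_length (n k : Nat) (h : k ≤ n) : (mnL n k).length = n := by
  simp [mnL]; omega

theorem mxL_length (n k : Nat) (h : k ≤ n) : (mxL n k).length = n := by
  simp [mxL]; omega

theorem mnL_succ (n k : Nat) (h : k ≤ n) : mnL (n+1) k = mnL n k ++ [0] := by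
  have : n + 1 - k = (n - k) + 1 := by omega
  rw [mnL, mnL, this, List.replicate_succ']
  simp

theorem mxL_succ (n k : Nat) (h1 : 1 ≤ k) (h2 : k ≤ n+1) :
    mxL (n+1) k = mxL n (k-1) ++ [1] := by
  have e1 : n + 1 - k = n - (k-1) := by omega
  have e2 : k = (k-1) + 1 := by omega
  rw [mxL, mxL, e1]
  conv_lhs => rw [e2]
  rw [List.replicate_succ']
  simp

theorem mnL_zero (n : Nat) : mnL n 0 = List.replicate n 0 := by simp [mnL]

theorem mnL_ne_mxL (n k : Nat) (h1 : 0 < k) (h2 : k < n) : mnL n k ≠ mxL n k := by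
  have e1 : mnL n k = 1 :: (List.replicate (k-1) 1 ++ List.replicate (n-k) 0) := by
    rw [mnL]
    have : k = (k-1)+1 := by omega
    rw [this]; simp [List.replicate_succ]
  have e2 : mxL n k = 0 :: (List.replicate (n-k-1) 0 ++ List.replicate k 1) := by
    rw [mxL]
    have : n - k = (n-k-1)+1 := by omega
    rw [this]; simp [List.replicate_succ]
  rw [e1, e2]; intro h; injection h with h' _; exact absurd h' (by norm_num)

theorem binL_mnL (n k : Nat) : binL (mnL n k) := by
  intro x hx
  rcases List.mem_append.1 hx with h | h
  · right; exact List.eq_of_mem_replicate h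
  · left; exact List.eq_of_mem_replicate h

theorem count_mnL (n k : Nat) : (mnL n k).count 1 = k := by
  simp [mnL, List.count_replicate]
theorem pyGetD_block (a b : Nat) (t : List Int) (j : Nat) (hj : j < a + b) :
    PySem.List.pyGetD (List.replicate a (0:Int) ++ List.replicate b 1 ++ t) (j : Int) 0 =
      if j < a then 0 else 1 := by
  rw [PySem.List.pyGetD_natCast]
  have hlen : j < (List.replicate a (0:Int) ++ List.replicate b 1 ++ t).length := by
    simp; omega
  rw [List.getD_eq_getElem _ _ hlen]
  simp only [List.append_assoc]
  rw [List.getElem_append (by simpa using (by simp at hlen; omega : j < a + (b + t.length)))]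
  rcases Nat.lt_or_ge j a with h | h
  · rw [dif_pos (by simpa using h), if_pos h]
    simp
  · rw [dif_neg (by simpa using (by omega : ¬ j < a)), if_neg (by omega)]
    rw [List.getElem_append (by simp; omega), dif_pos (by simp; omega)]
    simp
theorem jdg_nonpos (n : Int) (b : List Int) (h : n ≤ 0) : jdgoverA n b = true := by
  unfold jdgoverA
  rw [PySem.List.pyRange_one_eq_nil (by omega)]
  rfl
theorem loopA_stop (f : Nat) (up i : Int) (b : List Int) (data : List (List Int))
    (h : ¬ i < (b.length : Int) - 1) : loopA f up i b data = data := by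
  cases f <;> simp [loopA, h]

theorem loopA_nomove (f : Nat) (up i : Int) (b : List Int) (data : List (List Int))
    (h : i < (b.length : Int) - 1)
    (hp : ¬ (PySem.List.pyGetD b i 0 = 1 ∧ PySem.List.pyGetD b (i+1) 0 = 0)) :
    loopA (f+1) up i b data =
      if jdgoverA up b then data else loopA f up (i+1) b data := by
  simp [loopA, h, hp]

theorem loopA_move (f : Nat) (up i : Int) (b : List Int) (data : List (List Int))
    (h : i < (b.length : Int) - 1)
    (hp : PySem.List.pyGetD b i 0 = 1 ∧ PySem.List.pyGetD b (i+1) 0 = 0) :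
    loopA (f+1) up i b data =
      (let bm := restoreA i (PySem.List.pySetD (PySem.List.pySetD b i 0) (i+1) 1)
       let data' := data ++ [generate_data_bitmapA bm]
       if jdgoverA up bm then data' else loopA f up 0 bm data') := by
  simp [loopA, h, hp]

theorem foldl_add_sum (l : List Int) : ∀ c : Int, l.foldl (· + ·) c = c + l.sum := by
  induction l with
  | nil => intro c; simp
  | cons x xs ih => intro c; simp [List.foldl_cons, ih]; ring

theorem sum_mnL (n k : Nat) : (mnL n k).foldl (· + ·) (0:Int) = (k : Int) := by
  rw [foldl_add_sum]; simp [mnL]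

theorem set_fold_aux (n : Nat) : ∀ m : Nat, m ≤ n →
    (PySem.List.pyRange 0 (m:Int) 1).foldl (fun bm i => PySem.List.pySetD bm i 1)
      (List.replicate n (0:Int)) = mnL n m := by
  intro m
  induction m with
  | zero => intro _; rw [PySem.List.pyRange_one_eq_nil (by omega)]; simp [mnL]
  | succ m ih =>
    intro hm
    have : ((m+1:Nat):Int) = (m:Int) + 1 := by push_cast; ring
    rw [this, PySem.List.pyRange_one_succ_right (by positivity), List.foldl_append,
        ih (by omega)]
    simp only [List.foldl_cons, List.foldl_nil, PySem.List.pySetD_natCast]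
    rw [mnL, List.set_append, if_neg (by simp)]
    have e : n - m = (n - (m+1)) + 1 := by omega
    rw [e, List.replicate_succ, List.length_replicate]
    simp only [Nat.sub_self, List.set_cons_zero]
    rw [mnL, List.replicate_succ' , List.append_assoc]
    simp

theorem set_bitmapA_eval (base up : Int) (h0 : 0 ≤ up) (h1 : up ≤ base) :
    set_bitmapA base up = mnL base.toNat up.toNat := by
  unfold set_bitmapA set_zero_listA
  have : up = ((up.toNat : Nat) : Int) := by omega
  rw [this]
  exact set_fold_aux base.toNat up.toNat (by omega)

theorem genA_aux (b : List Int) (hb : binL b) : ∀ j : Nat, j ≤ b.length →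
    (PySem.List.pyRange 0 (j:Int) 1).foldl
      (fun d i => if PySem.List.pyGetD b i 0 = 1 then PySem.List.pySetD d i 1 else d)
      (List.replicate b.length (0:Int)) = b.take j ++ List.replicate (b.length - j) 0 := by
  intro j
  induction j with
  | zero => intro _; rw [PySem.List.pyRange_one_eq_nil (by omega)]; simp
  | succ j ih =>
    intro hj
    have hjl : j < b.length := by omega
    have : ((j+1:Nat):Int) = (j:Int) + 1 := by push_cast; ring
    rw [this, PySem.List.pyRange_one_succ_right (by positivity), List.foldl_append,
        ih (by omega)]
    simp only [List.foldl_cons, List.foldl_nil]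
    have hget : PySem.List.pyGetD b (j:Int) 0 = b[j] := by
      rw [PySem.List.pyGetD_natCast, List.getD_eq_getElem _ _ hjl]
    have htake : b.take (j+1) = b.take j ++ [b[j]] := by
      rw [List.take_add_one]; simp [List.getElem?_eq_getElem hjl]
    have e : b.length - j = (b.length - (j+1)) + 1 := by omega
    rcases hb b[j] (List.getElem_mem hjl) with h0 | h1
    · rw [hget, h0, if_neg (by norm_num), htake, e, List.replicate_succ, h0]
      simp
    · rw [hget, h1, if_pos rfl, PySem.List.pySetD_natCast, List.set_append,
          if_neg (by simp [List.length_take])]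
      rw [e, List.replicate_succ, List.length_take, Nat.min_eq_left (by omega)]
      simp only [Nat.sub_self, List.set_cons_zero]
      rw [htake, h1, List.append_assoc]
      simp

theorem genA_eq (b : List Int) (hb : binL b) : generate_data_bitmapA b = b := by
  unfold generate_data_bitmapA set_zero_listA
  have := genA_aux b hb b.length (le_refl _)
  simp only [Int.toNat_natCast] at this ⊢
  rw [this]
  simp

theorem loopA_scan (up : Int) (b : List Int) (data : List (List Int)) (m : Nat) :
    ∀ (f : Nat) (i : Int), 0 ≤ i → i + m ≤ (b.length : Int) - 1 →
    (∀ j : Int, i ≤ j → j < i + m →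
        ¬ (PySem.List.pyGetD b j 0 = 1 ∧ PySem.List.pyGetD b (j+1) 0 = 0)) →
    jdgoverA up b = false →
    loopA (f + m) up i b data = loopA f up (i + (m : Int)) b data := by
  induction m with
  | zero => intro f i _ _ _ _; simp
  | succ m ih =>
    intro f i h0 hm hnp hj
    have h1 : i < (b.length : Int) - 1 := by push_cast at hm ⊢; omega
    have : f + (m+1) = (f + m) + 1 := by omega
    rw [this, loopA_nomove _ _ _ _ _ h1 (hnp i (le_refl _) (by push_cast; omega)), hj]
    simp only [Bool.false_eq_true, if_false]
    rw [ih f (i+1) (by omega) (by push_cast at hm ⊢; omega)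
        (fun j hji hjm => hnp j (by omega) (by push_cast at hjm ⊢; omega)) hj]
    congr 1
    push_cast; ring

theorem colexB_rec (n k : Nat) (h1 : 0 < k) (h2 : k ≤ n) :
    colexB (n+1) (k:Int) =
      (colexB n (k:Int)).map (· ++ [0]) ++ (colexB n ((k-1:Nat):Int)).map (· ++ [1]) := by
  have c1 : ¬(((k:Nat):Int) = 0) := by omega
  have c2 : ¬((n:Int) + 1 ≤ ((k:Nat):Int)) := by omega
  have e : ((k:Nat):Int) - 1 = (((k-1:Nat)):Int) := by omega
  rw [colexB, if_neg c1, if_neg c2, e]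

theorem colex_cons (n : Nat) : ∀ (k : Nat), k ≤ n →
    colexB n (k : Int) = mnL n k :: (colexB n (k : Int)).tail := by
  induction n with
  | zero => intro k hk; interval_cases k; simp [colexB, mnL]
  | succ n ih =>
    intro k hk
    rcases Nat.eq_zero_or_pos k with h0 | h0
    · subst h0
      rw [colexB, if_pos (by simp)]
      simp [mnL_zero]
    rcases Nat.lt_or_ge k (n+1) with hlt | hge
    · rw [colexB_rec n k h0 (by omega), ih k (by omega), List.map_cons,
          ← mnL_succ n k (by omega)]
      simp only [List.cons_append, List.tail_cons]
    · have : k = n+1 := by omega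
      subst this
      have c1 : ¬((((n+1:Nat)):Int) = 0) := by omega
      rw [colexB, if_neg c1, if_pos (by omega)]
      simp [mnL]

theorem jdg_char (up : Int) (u : Nat) (w : List Int) (hup : 0 < up) (huu : up.toNat = u)
    (hw : binL w) (hc : w.count 1 = u) (hL : up ≤ (w.length : Int)) :
    (jdgoverA up w = true ↔ w = mxL w.length u) := by
  have huL : u ≤ w.length := by omega
  constructor
  · intro H
    rw [jdgoverA, List.all_eq_true] at H
    have Hj : ∀ j : Nat, w.length - u ≤ j → ∀ hj : j < w.length, w[j] ≠ 0 := by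
      intro j hj1 hj2
      have hm := H (j : Int) (by rw [PySem.List.mem_pyRange_one]; omega)
      simp only [Bool.not_eq_eq_eq_not, Bool.not_true, beq_eq_false_iff_ne, ne_eq] at hm
      rwa [PySem.List.pyGetD_natCast, List.getD_eq_getElem _ _ hj2] at hm
    have hdrop : w.drop (w.length - u) = List.replicate u 1 := by
      rw [List.eq_replicate_iff]
      refine ⟨by rw [List.length_drop]; omega, ?_⟩
      intro x hx
      obtain ⟨i, hi, rfl⟩ := List.mem_iff_getElem.1 hx
      rw [List.getElem_drop]
      have hlt : w.length - u + i < w.length := by simp at hi; omega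
      rcases hw _ (List.getElem_mem hlt) with h0 | h1
      · exact absurd h0 (Hj _ (by omega) hlt)
      · exact h1
    have hcnt0 : (w.take (w.length - u)).count 1 = 0 := by
      have hh := congrArg (List.count 1) (List.take_append_drop (w.length - u) w)
      rw [List.count_append, hdrop, List.count_replicate] at hh
      simp at hh
      omega
    have htake : w.take (w.length - u) = List.replicate (w.length - u) 0 := by
      rw [List.eq_replicate_iff]
      refine ⟨by rw [List.length_take]; omega, ?_⟩
      intro x hx
      rcases hw x (List.mem_of_mem_take hx) with h0 | h1
      · exact h0
      · exfalso; rw [h1] at hx; exact (List.count_eq_zero.mp hcnt0) hx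
    calc w = w.take (w.length - u) ++ w.drop (w.length - u) := (List.take_append_drop _ _).symm
      _ = List.replicate (w.length - u) 0 ++ List.replicate u 1 := by rw [htake, hdrop]
      _ = mxL w.length u := rfl
  · intro H
    rw [jdgoverA, List.all_eq_true]
    intro i hi
    rw [PySem.List.mem_pyRange_one] at hi
    have hji : i = ((i.toNat : Nat) : Int) := by omega
    have hblock : w = List.replicate (w.length - u) (0:Int) ++ List.replicate u 1 ++ [] := by
      simpa using H
    rw [hji, hblock, pyGetD_block _ _ _ _ (by omega)]
    rw [if_neg (by omega)]
    simp

theorem countFold (b : List Int) : ∀ (m : Nat) (c0 : Int), m ≤ b.length →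
    (PySem.List.pyRange 0 (m:Int) 1).foldl
      (fun c i => if PySem.List.pyGetD b i 0 = 1 then c + 1 else c) c0
      = c0 + (((b.take m).count 1 : Nat) : Int) := by
  intro m
  induction m with
  | zero => intro c0 _; rw [PySem.List.pyRange_one_eq_nil (by omega)]; simp
  | succ m ih =>
    intro c0 hm
    have hml : m < b.length := by omega
    have hcast : ((m+1:Nat):Int) = (m:Int) + 1 := by push_cast; ring
    rw [hcast, PySem.List.pyRange_one_succ_right (by positivity), List.foldl_append,
        ih c0 (by omega)]
    simp only [List.foldl_cons, List.foldl_nil]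
    have hget : PySem.List.pyGetD b (m:Int) 0 = b[m] := by
      rw [PySem.List.pyGetD_natCast, List.getD_eq_getElem _ _ hml]
    have htake : b.take (m+1) = b.take m ++ [b[m]] := by
      rw [List.take_add_one]; simp [List.getElem?_eq_getElem hml]
    rw [htake, List.count_append, hget]
    by_cases hb : b[m] = (1:Int)
    · rw [if_pos hb, hb]
      simp
      ring
    · rw [if_neg hb]
      have h0 : List.count 1 [b[m]] = 0 := by
        simp [List.count_singleton]
        intro hcontra
        exact hb hcontra
      rw [h0]
      simp

theorem writeFold (cnt : Int) : ∀ (m : Nat) (b : List Int), m ≤ b.length →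
    (PySem.List.pyRange 0 (m:Int) 1).foldl
      (fun bm i => if i < cnt then PySem.List.pySetD bm i 1 else PySem.List.pySetD bm i 0) b
      = (List.range m).map (fun j : Nat => if (j:Int) < cnt then (1:Int) else 0) ++ b.drop m := by
  intro m
  induction m with
  | zero => intro b _; rw [PySem.List.pyRange_one_eq_nil (by omega)]; simp
  | succ m ih =>
    intro b hm
    have hml : m < b.length := by omega
    have hcast : ((m+1:Nat):Int) = (m:Int) + 1 := by push_cast; ring
    rw [hcast, PySem.List.pyRange_one_succ_right (by positivity), List.foldl_append,
        ih b (by omega)]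
    simp only [List.foldl_cons, List.foldl_nil]
    rw [← apply_ite (fun v => PySem.List.pySetD
        ((List.range m).map (fun j : Nat => if (j:Int) < cnt then (1:Int) else 0) ++ b.drop m)
        (m:Int) v)]
    rw [PySem.List.pySetD_natCast, List.set_append, if_neg (by simp)]
    rw [List.drop_eq_getElem_cons hml]
    simp only [List.length_map, List.length_range, Nat.sub_self, List.set_cons_zero]
    rw [List.range_succ, List.map_append, List.append_assoc]
    simp

theorem thrMap (d : Nat) : ∀ m : Nat,
    (List.range m).map (fun j : Nat => if (j:Int) < ((d:Nat):Int) then (1:Int) else 0)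
      = List.replicate (min d m) 1 ++ List.replicate (m - d) 0 := by
  intro m
  induction m with
  | zero => simp
  | succ m ih =>
    rw [List.range_succ, List.map_append, ih]
    rcases Nat.lt_or_ge m d with h | h
    · rw [List.map_singleton, if_pos (by omega)]
      have e1 : min d m = m := by omega
      have e2 : min d (m+1) = m+1 := by omega
      have e3 : m - d = 0 := by omega
      have e4 : m + 1 - d = 0 := by omega
      rw [e1, e2, e3, e4, List.replicate_succ']
      simp
    · rw [List.map_singleton, if_neg (by omega)]
      have e1 : min d m = d := by omega
      have e2 : min d (m+1) = d := by omega
      have e3 : m + 1 - d = (m - d) + 1 := by omega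
      have er : List.replicate ((m-d)+1) (0:Int) = List.replicate (m-d) 0 ++ [0] :=
        List.replicate_succ'
      rw [e1, e2, e3, er]
      simp [List.append_assoc]

theorem restoreA_eval (a c : Nat) (t : List Int) (hc : 1 ≤ c) :
    restoreA ((a + c - 1 : Nat) : Int)
        (List.replicate a (0:Int) ++ List.replicate (c-1) 1 ++ [0] ++ 1 :: t) =
      List.replicate (c-1) (1:Int) ++ List.replicate (a+1) 0 ++ 1 :: t := by
  have hb : List.replicate a (0:Int) ++ List.replicate (c-1) 1 ++ [0] ++ 1 :: t
      = (List.replicate a (0:Int) ++ List.replicate (c-1) 1) ++ ((0:Int) :: 1 :: t) := by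
    simp [List.append_assoc]
  have hm : a + c - 1 = (List.replicate a (0:Int) ++ List.replicate (c-1) 1).length := by
    simp; omega
  rw [restoreA, hb, hm]
  rw [countFold _ _ _ (by simp), List.take_left' rfl]
  have hcnt : (List.replicate a (0:Int) ++ List.replicate (c-1) 1).count 1 = c - 1 := by
    rw [List.count_append, List.count_replicate, List.count_replicate]
    norm_num
  rw [hcnt, zero_add]
  rw [writeFold _ _ _ (by simp), List.drop_left' rfl]
  have hlen : (List.replicate a (0:Int) ++ List.replicate (c-1) 1).length = a + (c-1) := by
    simp
  rw [hlen, thrMap]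
  have e1 : min (c-1) (a + (c-1)) = c - 1 := by omega
  have e2 : a + (c-1) - (c-1) = a := by omega
  have er : List.replicate (a+1) (0:Int) = List.replicate a 0 ++ [0] := List.replicate_succ'
  rw [e1, e2, er]
  simp [List.append_assoc]

theorem binL_mxL (n k : Nat) : binL (mxL n k) := by
  intro x hx
  rcases List.mem_append.1 hx with h | h
  · left; exact List.eq_of_mem_replicate h
  · right; exact List.eq_of_mem_replicate h

theorem count_mxL (n k : Nat) : (mxL n k).count 1 = k := by
  simp [mxL, List.count_replicate]

-- ===== the main run lemma =====
-- From the minimal k-of-n combination (with fixed 0/1 suffix t), A's loop emits exactly the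
-- tail of the colex list and arrives at the maximal combination (breaking there iff jdgover
-- fires).
theorem runR (up : Int) :
    ∀ (n : Nat) (k : Nat), k ≤ n → ∀ (t : List Int) (data : List (List Int)) (f : Nat),
    binL t →
    (∀ w : List Int, w.length = n → binL w → w.count 1 = k → w ≠ mxL n k →
        jdgoverA up (w ++ t) = false) →
    ((jdgoverA up (mxL n k ++ t) = false →
        loopA (f + SA n k) up 0 (mnL n k ++ t) data =
          loopA f up 0 (mxL n k ++ t)
            (data ++ ((colexB n (k : Int)).tail.map (· ++ t)))) ∧
     (jdgoverA up (mxL n k ++ t) = true → 0 < k → k < n →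
        loopA (f + SA n k) up 0 (mnL n k ++ t) data =
          data ++ ((colexB n (k : Int)).tail.map (· ++ t)))) := by
  intro n
  induction n with
  | zero =>
    intro k hk t data f _ _
    interval_cases k
    constructor
    · intro _; simp [SA, mnL, mxL, colexB]
    · intro _ h; omega
  | succ n ih =>
    intro k hk t data f ht Hne
    rcases Nat.eq_zero_or_pos k with hk0 | hkpos
    · subst hk0
      have hmm : mnL (n+1) 0 = mxL (n+1) 0 := by simp [mnL, mxL]
      have hS : SA (n+1) 0 = 0 := by rw [SA]; simp
      have htl : (colexB (n+1) ((0:Nat):Int)).tail = [] := by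
        rw [colexB, if_pos (by simp)]
        rfl
      constructor
      · intro _; rw [hmm, hS, htl]; simp
      · intro _ h; omega
    rcases Nat.lt_or_ge k (n+1) with hklt | hkge
    swap
    · have hkn : k = n+1 := by omega
      subst hkn
      have hmm : mnL (n+1) (n+1) = mxL (n+1) (n+1) := by simp [mnL, mxL]
      have hS : SA (n+1) (n+1) = 0 := by rw [SA]; simp
      have htl : (colexB (n+1) (((n+1:Nat)):Int)).tail = [] := by
        rw [colexB, if_neg (by omega), if_pos (by omega)]
        rfl
      constructor
      · intro _; rw [hmm, hS, htl]; simp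
      · intro _ _ h; omega
    -- main case: 0 < k < n+1
    have hkn : k ≤ n := by omega
    have hn1 : 1 ≤ n := by omega
    have hstart : mnL (n+1) k ++ t = mnL n k ++ (0 :: t) := by
      rw [mnL_succ n k hkn]; simp
    have hmxrec : mxL (n+1) k = mxL n (k-1) ++ [1] := mxL_succ n k (by omega) (by omega)
    have hfinal : mxL n (k-1) ++ (1 :: t) = mxL (n+1) k ++ t := by
      rw [hmxrec]; simp
    have hne01 : ∀ w : List Int, (w ++ [(0:Int)]) ≠ mxL (n+1) k := by
      intro w he
      have h1 : (w ++ [(0:Int)]).getLast? = some 0 := List.getLast?_concat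
      rw [he, hmxrec, List.getLast?_concat] at h1
      exact absurd (Option.some.inj h1) (by norm_num)
    have HneSub1 : ∀ w : List Int, w.length = n → binL w → w.count 1 = k →
        w ≠ mxL n k → jdgoverA up (w ++ (0 :: t)) = false := by
      intro w h1 h2 h3 _
      have hbin : binL (w ++ [0]) := by
        intro x hx
        rcases List.mem_append.1 hx with h | h
        · exact h2 x h
        · left; simpa using h
      have hh := Hne (w ++ [0]) (by simp [h1]) hbin (by simp [h3]) (hne01 w)
      simpa [List.append_assoc] using hh
    have hjmx0 : jdgoverA up (mxL n k ++ (0 :: t)) = false := by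
      have hbin : binL (mxL n k ++ [0]) := by
        intro x hx
        rcases List.mem_append.1 hx with h | h
        · exact binL_mxL n k x h
        · left; simpa using h
      have hh := Hne (mxL n k ++ [0]) (by simp [mxL_length n k hkn]) hbin
        (by simp [count_mxL]) (hne01 _)
      simpa [List.append_assoc] using hh
    have ht0 : binL ((0:Int) :: t) := by
      intro x hx; rcases List.mem_cons.1 hx with h | h
      · left; exact h
      · exact ht x h
    have ht1 : binL ((1:Int) :: t) := by
      intro x hx; rcases List.mem_cons.1 hx with h | h
      · right; exact h
      · exact ht x h
    have hsub1 := (ih k hkn (0::t) data (f + n + SA n (k-1)) ht0 HneSub1).1 hjmx0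
    have hblockview : mxL n k ++ ((0:Int) :: t)
        = List.replicate (n-k) 0 ++ List.replicate k 1 ++ ((0:Int) :: t) := by
      simp [mxL, List.append_assoc]
    have hlenb1 : (mxL n k ++ ((0:Int) :: t)).length = n + 1 + t.length := by
      simp [mxL]; omega
    have hnopat : ∀ j : Int, 0 ≤ j → j < 0 + ((n-1 : Nat) : Int) →
        ¬ (PySem.List.pyGetD (mxL n k ++ ((0:Int) :: t)) j 0 = 1 ∧
           PySem.List.pyGetD (mxL n k ++ ((0:Int) :: t)) (j+1) 0 = 0) := by
      rintro j hj0 hjlt ⟨e1, e2⟩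
      have hjn : j.toNat < n - 1 := by omega
      have hj : j = ((j.toNat : Nat) : Int) := by omega
      rw [hj, hblockview, pyGetD_block (n-k) k _ j.toNat (by omega)] at e1
      by_cases hcase : j.toNat < n - k
      · rw [if_pos hcase] at e1; norm_num at e1
      · have hj1 : j + 1 = (((j.toNat + 1) : Nat) : Int) := by omega
        rw [hj1, hblockview, pyGetD_block (n-k) k _ (j.toNat+1) (by omega),
            if_neg (by omega)] at e2
        norm_num at e2
    have hfe : f + n + SA n (k-1) = (f + 1 + SA n (k-1)) + (n - 1) := by omega
    have hscan := loopA_scan up (mxL n k ++ ((0:Int) :: t)) (data ++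
        ((colexB n (k : Int)).tail.map (· ++ (0::t)))) (n-1) (f + 1 + SA n (k-1)) 0
        (le_refl 0) (by rw [hlenb1]; push_cast; omega) hnopat hjmx0
    rw [zero_add] at hscan
    have hpat1 : PySem.List.pyGetD (mxL n k ++ ((0:Int) :: t)) ((n-1:Nat):Int) 0 = 1 := by
      rw [hblockview, pyGetD_block (n-k) k _ (n-1) (by omega), if_neg (by omega)]
    have hpat2 : PySem.List.pyGetD (mxL n k ++ ((0:Int) :: t)) (((n-1:Nat):Int) + 1) 0 = 0 := by
      have hcast : ((n-1:Nat):Int) + 1 = ((n:Nat):Int) := by omega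
      rw [hcast, PySem.List.pyGetD_natCast,
          List.getD_eq_getElem _ _ (by rw [hlenb1]; omega)]
      rw [List.getElem_append_right (by rw [mxL_length n k hkn])]
      simp [mxL_length n k hkn]
    have hmove := loopA_move (f + SA n (k-1)) up ((n-1:Nat):Int)
        (mxL n k ++ ((0:Int) :: t)) (data ++ ((colexB n (k : Int)).tail.map (· ++ (0::t))))
        (by rw [hlenb1]; push_cast; omega) ⟨hpat1, hpat2⟩
    have hsets : PySem.List.pySetD
        (PySem.List.pySetD (mxL n k ++ ((0:Int) :: t)) ((n-1:Nat):Int) 0)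
        (((n-1:Nat):Int) + 1) 1
        = List.replicate (n-k) (0:Int) ++ List.replicate (k-1) 1 ++ [0] ++ 1 :: t := by
      have hview2 : mxL n k ++ ((0:Int) :: t)
          = (List.replicate (n-k) (0:Int) ++ List.replicate (k-1) 1) ++ (1 :: 0 :: t) := by
        rw [mxL]
        have e : k = (k-1) + 1 := by omega
        conv_lhs => rw [e]
        have er : List.replicate ((k-1)+1) (1:Int) = List.replicate (k-1) 1 ++ [1] :=
          List.replicate_succ'
        rw [er]
        simp [List.append_assoc]
        omega
      have hlenP : (List.replicate (n-k) (0:Int) ++ List.replicate (k-1) 1).length = n-1 := by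
        simp; omega
      rw [hview2, PySem.List.pySetD_natCast, List.set_append,
          if_neg (by rw [hlenP]; omega)]
      rw [hlenP, Nat.sub_self, List.set_cons_zero]
      have hcast : ((n-1:Nat):Int) + 1 = ((n:Nat):Int) := by omega
      rw [hcast, PySem.List.pySetD_natCast, List.set_append,
          if_neg (by rw [hlenP]; omega)]
      have e1 : n - (n-1) = 1 := by omega
      rw [hlenP, e1]
      simp [List.append_assoc]
    have hbmfull : restoreA ((n-1:Nat):Int)
        (PySem.List.pySetD
          (PySem.List.pySetD (mxL n k ++ ((0:Int) :: t)) ((n-1:Nat):Int) 0)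
          (((n-1:Nat):Int) + 1) 1)
        = mnL n (k-1) ++ ((1:Int) :: t) := by
      rw [hsets]
      have hre := restoreA_eval (n-k) k t (by omega)
      have hidx : (n-k) + k - 1 = n - 1 := by omega
      rw [hidx] at hre
      rw [hre, mnL]
      have e : n - (k-1) = (n-k) + 1 := by omega
      rw [e]
    have hbinbm : binL (mnL n (k-1) ++ ((1:Int) :: t)) := by
      intro x hx
      rcases List.mem_append.1 hx with h | h
      · exact binL_mnL n (k-1) x h
      · exact ht1 x h
    have hgen : generate_data_bitmapA (mnL n (k-1) ++ ((1:Int) :: t))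
        = mnL n (k-1) ++ ((1:Int) :: t) := genA_eq _ hbinbm
    have HneSub2 : ∀ w : List Int, w.length = n → binL w → w.count 1 = k-1 →
        w ≠ mxL n (k-1) → jdgoverA up (w ++ (1 :: t)) = false := by
      intro w h1 h2 h3 h4
      have hbin : binL (w ++ [1]) := by
        intro x hx
        rcases List.mem_append.1 hx with h | h
        · exact h2 x h
        · right; simpa using h
      have hne : (w ++ [(1:Int)]) ≠ mxL (n+1) k := by
        intro he
        rw [hmxrec] at he
        exact h4 (List.append_cancel_right he)
      have hh := Hne (w ++ [1]) (by simp [h1]) hbin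
        (by rw [List.count_append, h3]; simp; omega) hne
      simpa [List.append_assoc] using hh
    have hsub2 := ih (k-1) (by omega) (1::t)
        ((data ++ ((colexB n (k : Int)).tail.map (· ++ (0::t))))
          ++ [mnL n (k-1) ++ ((1:Int) :: t)]) f ht1 HneSub2
    have hSfuel : f + SA (n+1) k = (f + n + SA n (k-1)) + SA n k := by
      rw [SA, if_pos ⟨hkpos, hklt⟩]; omega
    have hasm : (data ++ ((colexB n (k : Int)).tail.map (· ++ (0::t))))
          ++ [mnL n (k-1) ++ ((1:Int) :: t)]
          ++ ((colexB n ((k-1 : Nat) : Int)).tail.map (· ++ (1::t)))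
        = data ++ ((colexB (n+1) (k : Int)).tail.map (· ++ t)) := by
      rw [colexB_rec n k hkpos hkn]
      conv_rhs => rw [colex_cons n k hkn, colex_cons n (k-1) (by omega)]
      simp [List.append_assoc, List.map_map, Function.comp_def]
    constructor
    · intro hfin
      have hjbm : jdgoverA up (mnL n (k-1) ++ ((1:Int) :: t)) = false := by
        by_cases hk1 : k = 1
        · subst hk1
          have hbm1 : mnL n 0 ++ ((1:Int) :: t) = mxL (n+1) 1 ++ t := by
            rw [← hfinal]; simp [mnL, mxL]
          rw [hbm1]
          exact hfin
        · exact HneSub2 (mnL n (k-1)) (mnL_length n (k-1) (by omega)) (binL_mnL _ _)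
            (count_mnL _ _) (mnL_ne_mxL n (k-1) (by omega) (by omega))
      have hfin' : jdgoverA up (mxL n (k-1) ++ ((1:Int) :: t)) = false := by
        rw [hfinal]; exact hfin
      rw [hstart, hSfuel, hsub1, hfe, hscan]
      have hf2 : f + 1 + SA n (k-1) = (f + SA n (k-1)) + 1 := by omega
      rw [hf2, hmove]
      simp only [hbmfull, hgen, hjbm, Bool.false_eq_true, if_false]
      rw [(hsub2.1) hfin']
      rw [hfinal, ← hasm]
    · intro hfin hk0' hklt'
      rw [hstart, hSfuel, hsub1, hfe, hscan]
      have hf2 : f + 1 + SA n (k-1) = (f + SA n (k-1)) + 1 := by omega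
      rw [hf2, hmove]
      by_cases hk1 : k = 1
      · subst hk1
        have hbm1 : mnL n 0 ++ ((1:Int) :: t) = mxL (n+1) 1 ++ t := by
          rw [← hfinal]; simp [mnL, mxL]
        have hjbm : jdgoverA up (mnL n 0 ++ ((1:Int) :: t)) = true := by
          rw [hbm1]; exact hfin
        simp only [hbmfull, hgen, hjbm, if_true]
        have htl0 : (colexB n ((0:Nat):Int)).tail = [] := by
          cases n with
          | zero => rfl
          | succ m => rw [colexB, if_pos (by simp)]; rfl
        rw [← hasm, htl0]
        simp [List.append_assoc]
      · have hjbm : jdgoverA up (mnL n (k-1) ++ ((1:Int) :: t)) = false :=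
          HneSub2 (mnL n (k-1)) (mnL_length n (k-1) (by omega)) (binL_mnL _ _)
            (count_mnL _ _) (mnL_ne_mxL n (k-1) (by omega) (by omega))
        simp only [hbmfull, hgen, hjbm, Bool.false_eq_true, if_false]
        have hfin' : jdgoverA up (mxL n (k-1) ++ ((1:Int) :: t)) = true := by
          rw [hfinal]; exact hfin
        rw [(hsub2.2) hfin' (by omega) (by omega)]
        rw [← hasm]

theorem colexB_zero (n : Nat) : colexB n ((0:Nat):Int) = [List.replicate n 0] := by
  cases n with
  | zero => rfl
  | succ m => rw [colexB, if_pos (by simp)]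

theorem colexB_full (n : Nat) (h : 1 ≤ n) : colexB n ((n:Nat):Int) = [List.replicate n 1] := by
  cases n with
  | zero => omega
  | succ m => rw [colexB, if_neg (by omega), if_pos (by omega)]

theorem binL_replicate_zero (n : Nat) : binL (List.replicate n (0:Int)) := by
  intro x hx; left; exact List.eq_of_mem_replicate hx

-- the common initial-bitmap build of both ports
theorem alt_bitmap_eq (base up : Int) :
    (PySem.List.pyRange 0 up 1).foldl (fun bm i => PySem.List.pySetD bm i 1)
      (List.replicate base.toNat (0 : Int)) = set_bitmapA base up := by
  rfl

theorem main_eq (base up : Int) (hpre : Pre_set_combination base up) :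
    set_combination base up = set_combination_alt base up := by
  by_cases hup0 : up ≤ 0
  · -- up ≤ 0 : single all-zero bitmap
    have hbm : set_bitmapA base up = List.replicate base.toNat 0 := by
      unfold set_bitmapA set_zero_listA
      rw [PySem.List.pyRange_one_eq_nil (by omega)]
      rfl
    have hsum : (List.replicate base.toNat (0:Int)).foldl (· + ·) 0 = ((0:Nat):Int) := by
      rw [foldl_add_sum]; simp
    have hgen : generate_data_bitmapA (List.replicate base.toNat 0)
        = List.replicate base.toNat 0 := genA_eq _ (binL_replicate_zero _)
    unfold set_combination set_combination_alt
    dsimp only []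
    rw [alt_bitmap_eq, hbm, hgen, hsum, List.length_replicate, colexB_zero]
    rcases Nat.lt_or_ge base.toNat 2 with hN | hN
    · rw [loopA_stop _ _ _ _ _ (by simp; omega)]
    · have hF : base.toNat * 2 ^ base.toNat + base.toNat + 2
          = (base.toNat * 2 ^ base.toNat + base.toNat + 1) + 1 := by omega
      have hrep : List.replicate base.toNat (0:Int) = 0 :: List.replicate (base.toNat - 1) 0 := by
        have e : base.toNat = (base.toNat - 1) + 1 := by omega
        conv_lhs => rw [e]
        rw [List.replicate_succ]
      rw [hF, loopA_nomove _ _ _ _ _ (by simp; omega)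
          (by rw [hrep]; rw [PySem.List.pyGetD_zero_cons]; norm_num)]
      rw [jdg_nonpos up _ hup0]
      simp
  · -- 0 < up ≤ base
    have hup0 : 0 < up := by omega
    have hub : up ≤ base := by rcases hpre with h | h; exact h; omega
    have hKN : up.toNat ≤ base.toNat := by omega
    have hK1 : 1 ≤ up.toNat := by omega
    have hbase : ((base.toNat : Nat) : Int) = base := by omega
    have hupc : ((up.toNat : Nat) : Int) = up := by omega
    have hbm : set_bitmapA base up = mnL base.toNat up.toNat :=
      set_bitmapA_eval base up (by omega) hub
    have hsum : (mnL base.toNat up.toNat).foldl (· + ·) 0 = ((up.toNat : Nat):Int) :=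
      sum_mnL _ _
    have hlen : (mnL base.toNat up.toNat).length = base.toNat := mnL_length _ _ hKN
    have hgen : generate_data_bitmapA (mnL base.toNat up.toNat) = mnL base.toNat up.toNat :=
      genA_eq _ (binL_mnL _ _)
    unfold set_combination set_combination_alt
    dsimp only []
    rw [alt_bitmap_eq, hbm, hgen, hsum, hlen]
    rcases Nat.eq_or_lt_of_le hKN with hKeq | hKlt
    · -- up = base : single all-one bitmap
      have hmx : mnL base.toNat up.toNat = mxL base.toNat up.toNat := by
        rw [hKeq]; simp [mnL, mxL]
      have hone : mnL base.toNat up.toNat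
          = List.replicate 0 (0:Int) ++ List.replicate base.toNat 1 ++ [] := by
        rw [hKeq]; simp [mnL]
      have hjdg : jdgoverA up (mnL base.toNat up.toNat) = true := by
        rw [jdg_char up up.toNat _ hup0 rfl (binL_mnL _ _) (count_mnL _ _) (by omega),
            hlen, hmx]
      have hcf : colexB base.toNat ((up.toNat : Nat) : Int) = [List.replicate base.toNat 1] := by
        rw [hKeq]; exact colexB_full base.toNat (by omega)
      rw [hcf]
      rcases Nat.lt_or_ge base.toNat 2 with hN | hN
      · rw [loopA_stop _ _ _ _ _ (by rw [hlen]; omega)]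
        have h1 : base.toNat = 1 := by omega
        rw [hKeq, h1]
        simp [mnL]
      · have hF : base.toNat * 2 ^ base.toNat + base.toNat + 2
            = (base.toNat * 2 ^ base.toNat + base.toNat + 1) + 1 := by omega
        have hp2 : PySem.List.pyGetD (mnL base.toNat up.toNat) ((0:Int)+1) 0 = 1 := by
          have e : (0:Int)+1 = ((1:Nat):Int) := by norm_num
          rw [hone, e, pyGetD_block 0 base.toNat [] 1 (by omega)]
          norm_num
        rw [hF, loopA_nomove _ _ _ _ _ (by rw [hlen]; omega)
            (by rintro ⟨_, e2⟩; rw [hp2] at e2; norm_num at e2)]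
        rw [hjdg]
        rw [hKeq]
        simp [mnL]
    · -- up < base : the full colex run
      have hN2 : 2 ≤ base.toNat := by omega
      have Hne : ∀ w : List Int, w.length = base.toNat → binL w →
          w.count 1 = up.toNat → w ≠ mxL base.toNat up.toNat →
          jdgoverA up (w ++ []) = false := by
        intro w h1 h2 h3 h4
        rw [List.append_nil]
        cases hb : jdgoverA up w with
        | false => rfl
        | true =>
          have := (jdg_char up up.toNat w hup0 rfl h2 h3 (by omega)).1 hb
          rw [h1] at this
          exact absurd this h4
      have hfin : jdgoverA up (mxL base.toNat up.toNat ++ []) = true := by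
        rw [List.append_nil]
        rw [jdg_char up up.toNat _ hup0 rfl (binL_mxL _ _) (count_mxL _ _)
            (by rw [mxL_length _ _ hKN]; omega), mxL_length _ _ hKN]
      have hrun := (runR up base.toNat up.toNat hKN [] [mnL base.toNat up.toNat]
          (base.toNat * 2 ^ base.toNat + base.toNat + 2 - SA base.toNat up.toNat)
          (by intro x hx; simp at hx) Hne).2 hfin hK1 hKlt
      have hF : base.toNat * 2 ^ base.toNat + base.toNat + 2
          = (base.toNat * 2 ^ base.toNat + base.toNat + 2 - SA base.toNat up.toNat)
            + SA base.toNat up.toNat := by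
        have := SA_le base.toNat up.toNat
        omega
      rw [List.append_nil] at hrun
      rw [hF, hrun]
      rw [colex_cons base.toNat up.toNat hKN]
      simp

-- ===== VERDICT (by name: the statement is the Claim_ definition above) =====
theorem set_combination_spec : Claim_equal_set_combination := by
  unfold Claim_equal_set_combination
  intro base up _ hpre
  unfold Spec_set_combination
  exact main_eq base up hpre
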